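-- pv_equiv track=rewrite | github.com/gitdwsong72/myzone-mobile-activation | backend/app/services/number_service.py | _find_consecutive_digits
-- ===== SOURCE A (Python) =====
-- def _find_consecutive_digits(digits: str) -> int:
--     """연속 숫자 찾기"""
--     max_consecutive = 0
--     current_consecutive = 1
--
--     for i in range(1, len(digits)):
--         if int(digits[i]) == int(digits[i - 1]) + 1:
--             current_consecutive += 1
--         else:
--             max_consecutive = max(max_consecutive, current_consecutive)
--             current_consecutive = 1
--
--     return max(max_consecutive, current_consecutive)
-- ===== SOURCE B (Python) =====
-- def _find_consecutive_digits(digits: str) -> int: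
--     # Break positions: indices where the increasing step fails.
--     n = len(digits)
--     breaks = [i for i in range(1, n) if int(digits[i]) != int(digits[i - 1]) + 1]
--     # Segment boundaries; the answer is the widest gap between adjacent boundaries
--     # (clamped to at least 1: a run is never shorter than one digit).
--     bounds = [0] + breaks + [n]
--     return max(max(b - a for a, b in zip(bounds, bounds[1:])), 1)
-- ===== Notes on version B (the rewrite author's own statement) =====
-- stated objective: alternative
-- what changed: Instead of streaming a (max_so_far, current_run) counter pair, B computes the list of break positions where the increasing step fails, turns it into segment boundaries [0]+breaks+[n], and returns the widest gap between adjacent boundaries (clamped to at least 1).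
import Mathlib
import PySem

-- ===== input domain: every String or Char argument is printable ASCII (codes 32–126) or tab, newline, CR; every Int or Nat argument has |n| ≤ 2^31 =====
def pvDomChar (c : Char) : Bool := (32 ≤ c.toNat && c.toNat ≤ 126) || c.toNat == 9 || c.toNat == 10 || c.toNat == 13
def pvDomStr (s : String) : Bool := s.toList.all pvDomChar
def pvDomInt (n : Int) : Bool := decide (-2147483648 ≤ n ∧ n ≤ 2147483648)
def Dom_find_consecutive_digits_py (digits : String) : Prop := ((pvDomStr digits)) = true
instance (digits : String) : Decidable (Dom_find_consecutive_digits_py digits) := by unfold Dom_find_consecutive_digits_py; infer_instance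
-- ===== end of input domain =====

-- B replaces A's streaming (max_so_far, current_run) counter by a break-position list:
-- boundaries [0]+breaks+[n] and the widest adjacent-boundary gap (clamped to ≥ 1); same O(n) cost.


-- ===== PORT A =====
-- int(c) for a one-character string; `none` (Python ValueError) is excluded by Pre_,
-- so the .getD 0 default is never reached on admitted inputs.
def pyIntChar (c : Char) : Int := (PySem.Int.ofChars? [c]).getD 0

-- the step test int(digits[i]) == int(digits[i-1]) + 1, shared verbatim by both ports
def pyStep (l : List Char) (i : Int) : Bool :=
  pyIntChar (PySem.List.pyGetD l i ' ') == pyIntChar (PySem.List.pyGetD l (i - 1) ' ') + 1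

-- literal transliteration of A: for i in range(1, len(digits)), state (max_consecutive, current_consecutive)
def find_consecutive_digits_py (digits : String) : Int :=
  let l := digits.toList
  let st := (PySem.List.pyRange 1 (PySem.Str.len digits) 1).foldl
    (fun (st : Int × Int) i =>
      if pyStep l i then (st.1, st.2 + 1) else (max st.1 st.2, 1))
    ((0 : Int), (1 : Int))
  max st.1 st.2

-- ===== PORT B =====
-- literal transliteration of B: break positions (indices where the step fails),
-- boundaries [0]+breaks+[n], widest adjacent-boundary gap, clamped to ≥ 1
def find_consecutive_digits_py_alt (digits : String) : Int :=
  let l := digits.toList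
  let n := PySem.Str.len digits
  let breaks := (PySem.List.pyRange 1 n 1).filter (fun i => !(pyStep l i))
  let bounds := (0 : Int) :: breaks ++ [n]
  let gaps := (bounds.zip (bounds.drop 1)).map (fun p => p.2 - p.1)
  max ((PySem.List.max? gaps (fun x => x)).getD 0) 1

-- ===== PRECONDITION & SPEC =====
-- Pre_ excludes exactly the inputs where Python raises ValueError: strings of length ≥ 2
-- containing a non-digit character (int() is applied to every character then).
def Pre_find_consecutive_digits_py (digits : String) : Prop :=
  digits.toList.length ≤ 1 ∨ digits.toList.all (fun c => c.isDigit) = true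
instance (digits : String) : Decidable (Pre_find_consecutive_digits_py digits) := by unfold Pre_find_consecutive_digits_py; infer_instance

def pvWitness_find_consecutive_digits_py : String := "1235689"

def Spec_find_consecutive_digits_py (digits : String) (out : Int) : Prop := out = find_consecutive_digits_py_alt digits
instance (digits : String) (out : Int) : Decidable (Spec_find_consecutive_digits_py digits out) := by unfold Spec_find_consecutive_digits_py; infer_instance

-- ===== CLAIM (what is proved, stated in full; the proofs are below) =====
def Claim_equal_find_consecutive_digits_py : Prop := ∀ (digits : String), Dom_find_consecutive_digits_py digits → Pre_find_consecutive_digits_py digits → Spec_find_consecutive_digits_py digits (find_consecutive_digits_py digits)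

-- ===== LEMMAS AND PROOFS =====

-- widest gap among the boundary list lb :: bs ++ [e], as a recursion on the inner break list
def gapMax (lb : Int) : List Int → Int → Int
  | [], e => e - lb
  | b :: bs, e => max (b - lb) (gapMax b bs e)

-- A's fold over consecutive indices s..e-1, started with current run c = s - lb, computes
-- max m (widest gap of lb :: breaks ++ [e]) — the bridge between the two algorithms.
theorem foldA_eq_gapMax (p : Int → Bool) : ∀ (k : Nat) (s m lb c e : Int),
    c = s - lb → e = s + k →
    (let st := (PySem.List.pyRange s e 1).foldl
        (fun (st : Int × Int) i => if p i then (st.1, st.2 + 1) else (max st.1 st.2, 1))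
        (m, c)
     max st.1 st.2)
    = max m (gapMax lb (((PySem.List.pyRange s e 1).filter (fun i => !(p i)))) e) := by
  intro k
  induction k with
  | zero =>
    intro s m lb c e hc he
    rw [he]
    simp [gapMax]
    omega
  | succ k ih =>
    intro s m lb c e hc he
    have hlt : s < e := by omega
    rw [PySem.List.pyRange_one_cons hlt]
    by_cases h : p s
    · simp only [List.foldl_cons, List.filter_cons, h, if_pos, Bool.not_true,
        Bool.false_eq_true, if_false]
      exact ih (s + 1) m lb (c + 1) e (by omega) (by push_cast at he ⊢; omega)
    · simp only [List.foldl_cons, h, Bool.false_eq_true, if_false, List.filter_cons,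
        Bool.not_false, if_true]
      rw [ih (s + 1) (max m c) s 1 e (by omega) (by push_cast at he ⊢; omega), gapMax]
      omega

-- the widest gap is positive when every boundary (including lb) stays below e
theorem gapMax_pos : ∀ (bs : List Int) (lb e : Int), lb ≤ e - 1 → (∀ b ∈ bs, b ≤ e - 1) →
    1 ≤ gapMax lb bs e := by
  intro bs
  induction bs with
  | nil => intro lb e h _; simp [gapMax]; omega
  | cons b bs ih =>
    intro lb e h hm
    have := ih b e (hm b (by simp)) (fun x hx => hm x (by simp [hx]))
    simp [gapMax]; omega

-- pulling an initial element out of a running max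
theorem foldl_max_init (xs : List Int) : ∀ (g x : Int),
    List.foldl max (max g x) xs = max g (List.foldl max x xs) := by
  induction xs with
  | nil => intro g x; simp
  | cons y ys ih => intro g x; simp only [List.foldl_cons, max_assoc, ih]

-- B's max-over-gaps of the boundary list lb :: bs ++ [e] equals gapMax lb bs e
theorem maxGaps_eq_gapMax : ∀ (bs : List Int) (lb e : Int),
    (PySem.List.max? (((lb :: bs ++ [e]).zip ((lb :: bs ++ [e]).drop 1)).map (fun p => p.2 - p.1))
      (fun x => x)).getD 0 = gapMax lb bs e := by
  intro bs
  induction bs with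
  | nil => intro lb e; simp [PySem.List.max?_id_cons, gapMax]
  | cons b bs ih =>
    intro lb e
    have h1 : ((lb :: (b :: bs) ++ [e]).zip ((lb :: (b :: bs) ++ [e]).drop 1)).map
        (fun p : Int × Int => p.2 - p.1)
        = (b - lb) :: ((b :: bs ++ [e]).zip ((b :: bs ++ [e]).drop 1)).map (fun p => p.2 - p.1) := by
      simp [List.zip]
    rw [h1]
    have h2 := ih b e
    rcases hx : ((b :: bs ++ [e]).zip ((b :: bs ++ [e]).drop 1)).map
        (fun p : Int × Int => p.2 - p.1) with _ | ⟨x, xs⟩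
    · exact absurd hx (by simp [List.zip])
    · rw [hx] at h2
      rw [PySem.List.max?_id_cons] at h2 ⊢
      simp only [Option.getD_some] at h2 ⊢
      rw [List.foldl_cons, foldl_max_init, h2, gapMax]

-- ===== VERDICT (by name: the statement is the Claim_ definition above) =====
theorem find_consecutive_digits_py_spec : Claim_equal_find_consecutive_digits_py := by
  intro digits _ _
  unfold Spec_find_consecutive_digits_py find_consecutive_digits_py find_consecutive_digits_py_alt
  simp only [PySem.Str.len_eq]
  rw [maxGaps_eq_gapMax]
  rcases Nat.eq_zero_or_pos digits.toList.length with h0 | hpos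
  · rw [List.length_eq_zero_iff] at h0
    rw [h0]
    simp [PySem.List.pyRange_one_eq_nil, gapMax]
  · rw [foldA_eq_gapMax (pyStep digits.toList) (digits.toList.length - 1 : Nat) 1 0 0 1
      (digits.toList.length : Int) (by omega) (by omega)]
    have hb : ∀ b ∈ (PySem.List.pyRange 1 (digits.toList.length : Int) 1).filter
        (fun i => !(pyStep digits.toList i)), b ≤ (digits.toList.length : Int) - 1 := by
      intro b hbmem
      have := List.mem_of_mem_filter hbmem
      rw [PySem.List.mem_pyRange_one] at this
      omega
    have hpos' : (1 : Int) ≤ gapMax 0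
        ((PySem.List.pyRange 1 (digits.toList.length : Int) 1).filter
          (fun i => !(pyStep digits.toList i))) (digits.toList.length : Int) :=
      gapMax_pos _ 0 _ (by omega) hb
    omega
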